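-- pv_equiv track=rewrite | github.com/JingwenHuang233/CS179M | main.py | select_best_balance_children
-- ===== SOURCE A (Python) =====
-- def select_best_balance_children(weights, unique_weights, attempted_distances, attempted_nodes):
--     best_nodes = []
--     for weight in unique_weights:
--             indicies = []
--             for idx, value in enumerate(weights):
--                 if value == weight:
--                     indicies.append(idx)
--             curr_distances = []
--             curr_min_distance = 99999
--             curr_min_idx = -1
--             for idx in indicies:
--                 if attempted_distances[idx] < curr_min_distance:
--                     curr_min_distance = attempted_distances[idx]
--                     curr_min_idx = idx
--             best_nodes.append(attempted_nodes[curr_min_idx])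
--     return best_nodes
-- ===== SOURCE B (Python) =====
-- def select_best_balance_children(weights, unique_weights, attempted_distances, attempted_nodes):
--     # One relaxation pass: every tracked weight starts at (99999, -1) and each
--     # position improves its weight's (distance, index) entry when its distance
--     # is strictly smaller; then emit the winning nodes in unique_weights order.
--     best = {w: (99999, -1) for w in unique_weights}
--     for idx, (w, d) in enumerate(zip(weights, attempted_distances)):
--         if w in best and d < best[w][0]:
--             best[w] = (d, idx)
--     return [attempted_nodes[best[w][1]] for w in unique_weights]
-- ===== Notes on version B (the rewrite author's own statement) =====
-- stated objective: faster
-- what changed: Instead of rescanning all weights for every unique weight, B seeds a dict with (99999, -1) per unique weight and does one relaxation pass over zip(weights, attempted_distances), then emits nodes in unique_weights order; Pre_ excludes only the inputs on which A raises IndexError (an out-of-range distance or node index).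
import Mathlib
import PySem

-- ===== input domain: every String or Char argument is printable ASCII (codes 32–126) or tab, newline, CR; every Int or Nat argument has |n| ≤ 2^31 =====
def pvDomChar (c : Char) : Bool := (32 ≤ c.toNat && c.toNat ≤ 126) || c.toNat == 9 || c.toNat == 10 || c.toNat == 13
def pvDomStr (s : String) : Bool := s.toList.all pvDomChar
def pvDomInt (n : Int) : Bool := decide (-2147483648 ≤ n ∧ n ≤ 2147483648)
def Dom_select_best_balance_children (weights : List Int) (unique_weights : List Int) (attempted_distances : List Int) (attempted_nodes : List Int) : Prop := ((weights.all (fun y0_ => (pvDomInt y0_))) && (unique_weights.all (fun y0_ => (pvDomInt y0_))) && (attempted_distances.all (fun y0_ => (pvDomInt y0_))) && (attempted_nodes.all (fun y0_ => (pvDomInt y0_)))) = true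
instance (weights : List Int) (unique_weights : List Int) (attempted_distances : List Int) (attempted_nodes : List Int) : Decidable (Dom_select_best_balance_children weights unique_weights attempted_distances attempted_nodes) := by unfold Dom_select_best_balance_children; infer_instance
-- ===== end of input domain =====

-- B replaces A's per-unique-weight rescans of weights with one relaxation pass over zip(weights, distances) into a pre-seeded dict (weight -> (min distance, index)); objective: faster.

-- ===== PORT A =====
-- per-weight body of A's outer loop: build `indicies`, scan them for the min distance, read the node
def pvAVal (weights : List Int) (attempted_distances : List Int) (attempted_nodes : List Int) (weight : Int) : Int :=
  let indicies := (PySem.List.enumerate weights).foldl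
    (fun acc p => if p.2 = weight then acc ++ [p.1] else acc) []
  let m := indicies.foldl
    (fun s idx =>
      if (PySem.List.pyGet? attempted_distances idx).getD 0 < s.1 then
        ((PySem.List.pyGet? attempted_distances idx).getD 0, idx)
      else s)
    ((99999 : Int), (-1 : Int))
  (PySem.List.pyGet? attempted_nodes m.2).getD 0

def select_best_balance_children (weights : List Int) (unique_weights : List Int) (attempted_distances : List Int) (attempted_nodes : List Int) : List Int :=
  unique_weights.foldl
    (fun best_nodes weight => best_nodes ++ [pvAVal weights attempted_distances attempted_nodes weight]) []

-- ===== PORT B =====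
-- B's seed dict: {w: (99999, -1) for w in unique_weights}
def pvSeed (unique_weights : List Int) : PySem.Dict Int (Int × Int) :=
  unique_weights.foldl (fun d w => d.insert w ((99999 : Int), (-1 : Int))) PySem.Dict.empty

-- B's relaxation pass over enumerate(zip(weights, attempted_distances))
def pvBDict (weights : List Int) (attempted_distances : List Int) (unique_weights : List Int) : PySem.Dict Int (Int × Int) :=
  (PySem.List.enumerate (weights.zip attempted_distances)).foldl
    (fun dict p =>
      match dict.get? p.2.1 with
      | some pr => if p.2.2 < pr.1 then dict.insert p.2.1 (p.2.2, p.1) else dict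
      | none => dict)
    (pvSeed unique_weights)

def select_best_balance_children_alt (weights : List Int) (unique_weights : List Int) (attempted_distances : List Int) (attempted_nodes : List Int) : List Int :=
  let best := pvBDict weights attempted_distances unique_weights
  -- best[w] in Python: the key is always present (seeded from unique_weights), so the default is never read
  unique_weights.map (fun w =>
    (PySem.List.pyGet? attempted_nodes ((best.getD w ((99999 : Int), (-1 : Int))).2)).getD 0)

-- ===== PRECONDITION & SPEC =====
-- Pre_ is exactly the inputs on which A returns (elsewhere A raises IndexError): every index whose weight
-- occurs in unique_weights lies inside attempted_distances, and for each unique weight the node index A reads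
-- is valid — the first matching index attaining the minimal distance (when that minimum is < 99999) lies
-- inside attempted_nodes, and otherwise attempted_nodes is nonempty (A then reads attempted_nodes[-1]).
def Pre_select_best_balance_children (weights : List Int) (unique_weights : List Int) (attempted_distances : List Int) (attempted_nodes : List Int) : Prop :=
  (∀ p ∈ PySem.List.enumerate weights, p.2 ∈ unique_weights → p.1 < (attempted_distances.length : Int)) ∧
  (∀ wt ∈ unique_weights,
    (∃ p ∈ PySem.List.enumerate weights, p.2 = wt ∧
      (PySem.List.pyGet? attempted_distances p.1).getD 0 < 99999 ∧
      p.1 < (attempted_nodes.length : Int) ∧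
      (∀ q ∈ PySem.List.enumerate weights, q.2 = wt →
        (PySem.List.pyGet? attempted_distances p.1).getD 0 ≤ (PySem.List.pyGet? attempted_distances q.1).getD 0 ∧
        (q.1 < p.1 → (PySem.List.pyGet? attempted_distances p.1).getD 0 < (PySem.List.pyGet? attempted_distances q.1).getD 0))) ∨
    ((∀ p ∈ PySem.List.enumerate weights, p.2 = wt → ¬ (PySem.List.pyGet? attempted_distances p.1).getD 0 < 99999) ∧
      attempted_nodes ≠ []))
instance (weights : List Int) (unique_weights : List Int) (attempted_distances : List Int) (attempted_nodes : List Int) : Decidable (Pre_select_best_balance_children weights unique_weights attempted_distances attempted_nodes) := by unfold Pre_select_best_balance_children; infer_instance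

def pvWitness_select_best_balance_children : List Int × List Int × List Int × List Int :=
  ([3, 4, 3], [3, 4], [5, 2, 1], [10, 20, 30])

def Spec_select_best_balance_children (weights : List Int) (unique_weights : List Int) (attempted_distances : List Int) (attempted_nodes : List Int) (out : List Int) : Prop := out = select_best_balance_children_alt weights unique_weights attempted_distances attempted_nodes
instance (weights : List Int) (unique_weights : List Int) (attempted_distances : List Int) (attempted_nodes : List Int) (out : List Int) : Decidable (Spec_select_best_balance_children weights unique_weights attempted_distances attempted_nodes out) := by unfold Spec_select_best_balance_children; infer_instance

-- ===== CLAIM (what is proved, stated in full; the proofs are below) =====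
def Claim_equal_select_best_balance_children : Prop := ∀ (weights : List Int) (unique_weights : List Int) (attempted_distances : List Int) (attempted_nodes : List Int), Dom_select_best_balance_children weights unique_weights attempted_distances attempted_nodes → Pre_select_best_balance_children weights unique_weights attempted_distances attempted_nodes → Spec_select_best_balance_children weights unique_weights attempted_distances attempted_nodes (select_best_balance_children weights unique_weights attempted_distances attempted_nodes)

-- ===== LEMMAS AND PROOFS =====

-- seeding gives every unique weight the entry (99999, -1)
lemma pvSeed_get (wt : Int) :
    ∀ (uw : List Int) (dict : PySem.Dict Int (Int × Int)),
    (wt ∈ uw ∨ dict.get? wt = some ((99999 : Int), (-1 : Int))) →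
    (uw.foldl (fun d w => d.insert w ((99999 : Int), (-1 : Int))) dict).get? wt =
      some ((99999 : Int), (-1 : Int)) := by
  intro uw
  induction uw with
  | nil => intro dict h; simpa using h.resolve_left (by simp)
  | cons w t ih =>
    intro dict h
    simp only [List.foldl_cons]
    by_cases hwt : wt = w
    · exact ih _ (Or.inr (hwt ▸ PySem.Dict.get?_insert_self _ _ _))
    · rcases h with hm | hg
      · rcases List.mem_cons.mp hm with he | ht
        · exact absurd he hwt
        · exact ih _ (Or.inl ht)
      · exact ih _ (Or.inr (by rw [PySem.Dict.get?_insert_of_ne _ _ hwt]; exact hg))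

-- the relaxation pass carries the entry at wt exactly as A's per-weight scan state
lemma pvFold_get (wt : Int) :
    ∀ (l : List (Int × (Int × Int))) (dict : PySem.Dict Int (Int × Int)) (s : Int × Int),
    dict.get? wt = some s →
    (l.foldl
        (fun dict p =>
          match dict.get? p.2.1 with
          | some pr => if p.2.2 < pr.1 then dict.insert p.2.1 (p.2.2, p.1) else dict
          | none => dict)
        dict).get? wt =
      some ((l.filter (fun p => decide (p.2.1 = wt))).foldl
        (fun s p => if p.2.2 < s.1 then (p.2.2, p.1) else s) s) := by
  intro l
  induction l with
  | nil => intro dict s h; simpa using h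
  | cons p t ih =>
    intro dict s h
    simp only [List.foldl_cons, List.filter_cons]
    by_cases hp : p.2.1 = wt
    · have hm : (match dict.get? p.2.1 with
          | some pr => if p.2.2 < pr.1 then dict.insert p.2.1 (p.2.2, p.1) else dict
          | none => dict) = if p.2.2 < s.1 then dict.insert p.2.1 (p.2.2, p.1) else dict := by
        rw [hp, h]
      rw [hm]
      simp only [hp, decide_true, if_true, List.foldl_cons]
      split_ifs with hd
      · exact ih _ _ (PySem.Dict.get?_insert_self _ _ _)
      · exact ih _ _ h
    · simp only [hp, decide_false, Bool.false_eq_true, if_false]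
      cases hg : dict.get? p.2.1 with
      | none => exact ih _ _ h
      | some pr =>
        rw [show (match some pr with
            | some pr => if p.2.2 < pr.1 then dict.insert p.2.1 (p.2.2, p.1) else dict
            | none => dict) = if p.2.2 < pr.1 then dict.insert p.2.1 (p.2.2, p.1) else dict from rfl]
        split_ifs with hd
        · exact ih _ _ (by rw [PySem.Dict.get?_insert_of_ne _ _ (fun he => hp he.symm)]; exact h)
        · exact ih _ _ h

-- A's `indicies` loop is the filtered index list
lemma pv_indicies (weights : List Int) (wt : Int) :
    (PySem.List.enumerate weights).foldl (fun acc p => if p.2 = wt then acc ++ [p.1] else acc)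
        ([] : List Int) =
      ((PySem.List.enumerate weights).filter (fun p => decide (p.2 = wt))).map (·.1) := by
  simpa using PySem.List.foldl_append_ite (fun (q : Int × Int) => q.2 = wt) (fun q => q.1)
    (PySem.List.enumerate weights) []

-- enumerate(zip w d) is the d-length prefix of enumerate(w) decorated with the distance at that index
lemma pvEnumZip (w d : List Int) :
    PySem.List.enumerate (w.zip d) =
      ((PySem.List.enumerate w).take d.length).map
        (fun p => (p.1, (p.2, (PySem.List.pyGet? d p.1).getD 0))) := by
  apply List.ext_getElem
  · simp [PySem.List.length_enumerate]
    omega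
  · intro k h1 h2
    have hk : k < (w.zip d).length := by simpa [PySem.List.length_enumerate] using h1
    have hkd : k < d.length := by simp at hk; omega
    simp [PySem.List.getElem_enumerate, List.getElem_take, List.getElem_zip,
      PySem.List.pyGet?_natCast, List.getElem?_eq_getElem hkd]

-- under the in-range condition, filtering the d-length prefix of enumerate(w) loses no match
lemma pvMatches_take (w d : List Int) (wt : Int)
    (H : ∀ p ∈ PySem.List.enumerate w, p.2 = wt → p.1 < (d.length : Int)) :
    ((PySem.List.enumerate w).take d.length).filter (fun p => decide (p.2 = wt)) =
      (PySem.List.enumerate w).filter (fun p => decide (p.2 = wt)) := by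
  conv_rhs => rw [← List.take_append_drop d.length (PySem.List.enumerate w), List.filter_append]
  have hdrop : ((PySem.List.enumerate w).drop d.length).filter (fun p => decide (p.2 = wt)) = [] := by
    rw [List.filter_eq_nil_iff]
    intro p hp hdec
    have hmem : p ∈ PySem.List.enumerate w := List.mem_of_mem_drop hp
    have hlt := H p hmem (by simpa using hdec)
    obtain ⟨k, hk, hpk⟩ := List.getElem_of_mem hp
    have hk2 : d.length + k < (PySem.List.enumerate w).length := by
      have hk' := hk
      simp [PySem.List.length_enumerate] at hk' ⊢
      omega
    rw [List.getElem_drop] at hpk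
    rw [← hpk] at hlt
    rw [PySem.List.getElem_enumerate] at hlt
    simp at hlt
    omega
  rw [hdrop, List.append_nil]

-- per-weight agreement: A's scan value equals B's dict lookup value
lemma pvVal_eq (weights dists nodes : List Int) (uw : List Int) (wt : Int) (hwt : wt ∈ uw)
    (H : ∀ p ∈ PySem.List.enumerate weights, p.2 = wt → p.1 < (dists.length : Int)) :
    pvAVal weights dists nodes wt =
      (PySem.List.pyGet? nodes
        (((pvBDict weights dists uw).getD wt ((99999 : Int), (-1 : Int))).2)).getD 0 := by
  simp only [pvAVal, pvBDict]
  rw [pv_indicies, List.foldl_map, pvEnumZip]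
  simp only [List.foldl_map]
  have hseed := pvSeed_get wt uw PySem.Dict.empty (Or.inl hwt)
  have h := pvFold_get wt
      (((PySem.List.enumerate weights).take dists.length).map
        (fun p => (p.1, (p.2, (PySem.List.pyGet? dists p.1).getD 0))))
      (pvSeed uw) ((99999 : Int), (-1 : Int)) hseed
  simp only [List.filter_map, List.foldl_map, Function.comp_def] at h
  rw [pvMatches_take weights dists wt H] at h
  rw [PySem.Dict.getD_eq_get?_getD, h]
  rfl

theorem pv_main (weights unique_weights dists nodes : List Int)
    (hpre : Pre_select_best_balance_children weights unique_weights dists nodes) :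
    select_best_balance_children weights unique_weights dists nodes =
      select_best_balance_children_alt weights unique_weights dists nodes := by
  simp only [select_best_balance_children, select_best_balance_children_alt]
  rw [PySem.List.foldl_append_singleton_eq_map]
  simp only [List.nil_append]
  refine List.map_congr_left (fun wt hwt => ?_)
  exact pvVal_eq weights dists nodes unique_weights wt hwt
    (fun p hp hwt' => hpre.1 p hp (hwt' ▸ hwt))

-- ===== VERDICT (by name: the statement is the Claim_ definition above) =====
theorem select_best_balance_children_spec : Claim_equal_select_best_balance_children := by
  intro weights unique_weights dists nodes _ hpre
  unfold Spec_select_best_balance_children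
  exact pv_main weights unique_weights dists nodes hpre
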